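-- pv_equiv track=rewrite | github.com/Aaron349899401/myprograms | scrabble.py | www
-- ===== SOURCE A (Python) =====
-- def scrab_score(bum):
--     score = {
--         **dict.fromkeys("AEIOULNSTR", 1),
--         **dict.fromkeys("DG", 2),
--         **dict.fromkeys("BCMP", 3),
--         **dict.fromkeys("FHVWY", 4),
--         **dict.fromkeys("K", 5),
--         **dict.fromkeys("JX", 8),
--         **dict.fromkeys("QZ", 10)
--     }
--
--     return sum(score.get(item.upper(), 0) for item in bum)
--
-- def www(word_list):
--     swapped = True
--     while swapped:
--         swapped = False
--         for index in range(1, len(word_list)):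
--             if scrab_score(word_list[index - 1]) < scrab_score(word_list[index]):
--                 word_list[index - 1], word_list[index] = word_list[index], word_list[index - 1]
--                 swapped = True
--     return word_list
-- ===== SOURCE B (Python) =====
-- def scrab_score(bum):
--     score = {
--         **dict.fromkeys("AEIOULNSTR", 1),
--         **dict.fromkeys("DG", 2),
--         **dict.fromkeys("BCMP", 3),
--         **dict.fromkeys("FHVWY", 4),
--         **dict.fromkeys("K", 5),
--         **dict.fromkeys("JX", 8),
--         **dict.fromkeys("QZ", 10)
--     }
--
--     return sum(score.get(item.upper(), 0) for item in bum)
--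
-- def www(word_list):
--     # One pass: bucket each word under its score (keeps original order per score),
--     # then drain the distinct scores in descending order.
--     buckets = {}
--     for w in word_list:
--         buckets.setdefault(scrab_score(w), []).append(w)
--     result = []
--     for s in sorted(buckets, reverse=True):
--         result.extend(buckets[s])
--     word_list[:] = result
--     return word_list
-- ===== Notes on version B (the rewrite author's own statement) =====
-- stated objective: faster
-- what changed: Replaces A's in-place bubble sort (repeated adjacent-swap passes until no swap) by one bucketing pass that groups words by scrabble score in a dict, then concatenates the buckets over the distinct scores in descending order (stable by construction); the result is assigned back with word_list[:] so the in-place mutation and returned identity match A.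
import Mathlib
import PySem

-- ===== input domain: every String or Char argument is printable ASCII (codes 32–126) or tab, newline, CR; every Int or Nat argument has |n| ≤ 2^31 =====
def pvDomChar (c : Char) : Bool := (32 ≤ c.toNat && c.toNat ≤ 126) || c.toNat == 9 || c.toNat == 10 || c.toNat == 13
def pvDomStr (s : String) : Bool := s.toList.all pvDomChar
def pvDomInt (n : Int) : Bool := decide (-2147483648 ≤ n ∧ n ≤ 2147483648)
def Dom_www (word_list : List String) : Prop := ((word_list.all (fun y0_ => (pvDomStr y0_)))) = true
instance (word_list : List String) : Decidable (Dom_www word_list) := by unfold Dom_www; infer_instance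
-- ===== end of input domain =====

-- B replaces A's in-place bubble sort by one bucketing pass plus a descending sweep over
-- the distinct scores (objective: faster). Both A and B mutate the Python argument list in
-- place and return it; the equivalence proved here is about the RETURN value (B performs the
-- same mutation via word_list[:] = result).

-- ===== PORT A =====
-- the letter-score dict built by merging the seven dict.fromkeys blocks
def scrabDict : PySem.Dict Char Int :=
  let d := ("AEIOULNSTR".toList).foldl (fun d c => d.insert c 1) PySem.Dict.empty
  let d := ("DG".toList).foldl (fun d c => d.insert c 2) d
  let d := ("BCMP".toList).foldl (fun d c => d.insert c 3) d
  let d := ("FHVWY".toList).foldl (fun d c => d.insert c 4) d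
  let d := ("K".toList).foldl (fun d c => d.insert c 5) d
  let d := ("JX".toList).foldl (fun d c => d.insert c 8) d
  ("QZ".toList).foldl (fun d c => d.insert c 10) d

-- item.upper() for a single character; exact on the ASCII domain (a 1-char ASCII string
-- uppercases to the 1-char string PySem.Chars.upper produces)
def pyUpperChar (c : Char) : Char := (PySem.Chars.upper [c]).headD c

-- sum(score.get(item.upper(), 0) for item in bum)
def scrabScore (bum : String) : Int :=
  (bum.toList.map (fun c => scrabDict.getD (pyUpperChar c) 0)).sum

-- one execution of A's inner 'for index in range(1, len(word_list))' with its in-place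
-- swaps: the carried head is the element currently at index-1; the Bool is 'swapped'
def passA : List String → List String × Bool
  | [] => ([], false)
  | [x] => ([x], false)
  | x :: y :: rest =>
    if scrabScore x < scrabScore y then
      let r := passA (x :: rest)
      (y :: r.1, true)
    else
      let r := passA (y :: rest)
      (x :: r.1, r.2)
termination_by l => l.length
decreasing_by all_goals simp

-- number of out-of-order pairs (termination measure for A's while loop)
def invCount : List String → Nat
  | [] => 0
  | x :: t => t.countP (fun y => decide (scrabScore x < scrabScore y)) + invCount t

theorem invCount_cons (x : String) (t : List String) :
    invCount (x :: t) = t.countP (fun z => decide (scrabScore x < scrabScore z)) + invCount t := rfl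

theorem passA_perm : ∀ xs : List String, (passA xs).1.Perm xs := by
  intro xs
  fun_induction passA with
  | case1 => simp
  | case2 => simp
  | case3 x y rest h r ih =>
    exact (ih.cons y).trans (List.Perm.swap x y rest)
  | case4 x y rest h r ih => exact ih.cons x

theorem passA_inv : ∀ xs : List String,
    invCount (passA xs).1 ≤ invCount xs ∧
    ((passA xs).2 = true → invCount (passA xs).1 < invCount xs) := by
  intro xs
  fun_induction passA with
  | case1 => simp
  | case2 => simp
  | case3 x y rest h r ih =>
    have hr : r = passA (x :: rest) := rfl
    rw [hr] at *
    obtain ⟨ih1, _⟩ := ih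
    have hcnt : (passA (x :: rest)).1.countP (fun z => decide (scrabScore y < scrabScore z))
        = (x :: rest).countP (fun z => decide (scrabScore y < scrabScore z)) :=
      (passA_perm (x :: rest)).countP_eq _
    have hc : (x :: rest).countP (fun z => decide (scrabScore y < scrabScore z))
        = rest.countP (fun z => decide (scrabScore y < scrabScore z)) := by
      rw [List.countP_cons]; simp; omega
    have hc2 : (y :: rest).countP (fun z => decide (scrabScore x < scrabScore z))
        = rest.countP (fun z => decide (scrabScore x < scrabScore z)) + 1 := by
      rw [List.countP_cons]; simp [h]
    rw [invCount_cons] at ih1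
    constructor
    · show invCount (y :: (passA (x :: rest)).1) ≤ invCount (x :: y :: rest)
      rw [invCount_cons, hcnt, hc, invCount_cons, hc2, invCount_cons]
      omega
    · intro _
      show invCount (y :: (passA (x :: rest)).1) < invCount (x :: y :: rest)
      rw [invCount_cons, hcnt, hc, invCount_cons, hc2, invCount_cons]
      omega
  | case4 x y rest h r ih =>
    have hr : r = passA (y :: rest) := rfl
    rw [hr] at *
    obtain ⟨ih1, ih2⟩ := ih
    have hcnt : (passA (y :: rest)).1.countP (fun z => decide (scrabScore x < scrabScore z))
        = (y :: rest).countP (fun z => decide (scrabScore x < scrabScore z)) :=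
      (passA_perm (y :: rest)).countP_eq _
    constructor
    · show invCount (x :: (passA (y :: rest)).1) ≤ invCount (x :: y :: rest)
      rw [invCount_cons, hcnt, invCount_cons]
      omega
    · intro hs
      have := ih2 hs
      show invCount (x :: (passA (y :: rest)).1) < invCount (x :: y :: rest)
      rw [invCount_cons, hcnt, invCount_cons]
      omega

-- A's 'while swapped' loop
def loopA (xs : List String) : List String :=
  let r := passA xs
  if hs : r.2 then loopA r.1 else r.1
termination_by invCount xs
decreasing_by exact (passA_inv xs).2 hs

def www (word_list : List String) : List String := loopA word_list

-- ===== PORT B =====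
-- buckets.setdefault(scrab_score(w), []).append(w) over the whole list
def buildBuckets (xs : List String) : PySem.Dict Int (List String) :=
  xs.foldl (fun d w =>
    let s := scrabScore w
    d.insert s (d.getD s [] ++ [w])) PySem.Dict.empty

def www_alt (word_list : List String) : List String :=
  let buckets := buildBuckets word_list
  (PySem.List.sorted buckets.keys (fun k => k) true).foldl
    (fun acc s => acc ++ buckets.getD s []) []

-- ===== PRECONDITION & SPEC =====
def Spec_www (word_list : List String) (out : List String) : Prop := out = www_alt word_list
instance (word_list : List String) (out : List String) : Decidable (Spec_www word_list out) := by unfold Spec_www; infer_instance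

-- ===== CLAIM (what is proved, stated in full; the proofs are below) =====
def Claim_equal_www : Prop := ∀ (word_list : List String), Dom_www word_list → Spec_www word_list (www word_list)

-- ===== LEMMAS AND PROOFS =====

-- the descending-score order both results satisfy
def DescR (a b : String) : Prop := scrabScore b ≤ scrabScore a

-- score-s slice of a list, in original order (stability invariant)
def slice (s : Int) (xs : List String) : List String :=
  xs.filter (fun w => scrabScore w == s)

theorem slice_cons (s : Int) (w : String) (l : List String) :
    slice s (w :: l) = if scrabScore w == s then w :: slice s l else slice s l := by
  simp only [slice, List.filter_cons]

theorem passA_filter (s : Int) : ∀ xs : List String, slice s (passA xs).1 = slice s xs := by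
  intro xs
  fun_induction passA with
  | case1 => rfl
  | case2 => rfl
  | case3 x y rest h r ih =>
    have hr : r = passA (x :: rest) := rfl
    rw [hr] at *
    show slice s (y :: (passA (x :: rest)).1) = slice s (x :: y :: rest)
    by_cases hy : scrabScore y = s <;> by_cases hx : scrabScore x = s
    · omega
    · simp [slice_cons, ih, hy, hx]
    · simp [slice_cons, ih, hy, hx]
    · simp [slice_cons, ih, hy, hx]
  | case4 x y rest h r ih =>
    have hr : r = passA (y :: rest) := rfl
    rw [hr] at *
    show slice s (x :: (passA (y :: rest)).1) = slice s (x :: y :: rest)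
    simp only [slice_cons, ih]

theorem passA_done : ∀ xs : List String, (passA xs).2 = false →
    (passA xs).1 = xs ∧ xs.Pairwise DescR := by
  intro xs
  fun_induction passA with
  | case1 => simp
  | case2 => simp [DescR]
  | case3 x y rest h r ih => simp
  | case4 x y rest h r ih =>
    intro hs
    obtain ⟨h1, h2⟩ := ih hs
    refine ⟨by simpa [h1], ?_⟩
    constructor
    · intro z hz
      rcases List.mem_cons.mp hz with hz' | hz'
      · subst hz'; exact le_of_not_gt h
      · have hy := (List.pairwise_cons.mp h2).1 z hz'
        exact le_trans hy (le_of_not_gt h)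
    · exact h2

theorem loopA_filter (s : Int) : ∀ xs : List String, slice s (loopA xs) = slice s xs := by
  intro xs
  fun_induction loopA with
  | case1 xs r hs ih => rw [ih, passA_filter]
  | case2 xs r hs =>
    have := passA_done xs (by simpa using hs)
    rw [this.1]

theorem loopA_pairwise : ∀ xs : List String, (loopA xs).Pairwise DescR := by
  intro xs
  fun_induction loopA with
  | case1 xs r hs ih => exact ih
  | case2 xs r hs =>
    have := passA_done xs (by simpa using hs)
    rw [this.1]; exact this.2

-- membership in a slice
theorem mem_slice {s : Int} {w : String} {xs : List String} :
    w ∈ slice s xs ↔ w ∈ xs ∧ scrabScore w = s := by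
  simp [slice]

-- uniqueness: two score-descending lists with the same score slices are equal
theorem slices_unique : ∀ ys zs : List String,
    (∀ s : Int, slice s ys = slice s zs) →
    ys.Pairwise DescR → zs.Pairwise DescR → ys = zs := by
  intro ys
  induction ys with
  | nil =>
    intro zs hf _ _
    cases zs with
    | nil => rfl
    | cons b zs' =>
      have := hf (scrabScore b)
      simp [slice, List.filter] at this
  | cons a ys' ih =>
    intro zs hf hys hzs
    cases zs with
    | nil =>
      have := hf (scrabScore a)
      simp [slice, List.filter] at this
    | cons b zs' =>
      -- key a = key b
      have hab : scrabScore a = scrabScore b := by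
        have h1 : b ∈ slice (scrabScore b) (a :: ys') := by
          rw [hf]; exact mem_slice.mpr ⟨List.mem_cons_self, rfl⟩
        have h2 : a ∈ slice (scrabScore a) (b :: zs') := by
          rw [← hf]; exact mem_slice.mpr ⟨List.mem_cons_self, rfl⟩
        have hb := (mem_slice.mp h1).1
        have ha := (mem_slice.mp h2).1
        rcases List.mem_cons.mp hb with hb' | hb'
        · rw [hb']
        · have hle : scrabScore b ≤ scrabScore a := (List.pairwise_cons.mp hys).1 b hb'
          rcases List.mem_cons.mp ha with ha' | ha'
          · rw [ha']
          · have hle2 : scrabScore a ≤ scrabScore b := (List.pairwise_cons.mp hzs).1 a ha'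
            omega
      have h0 := hf (scrabScore a)
      simp only [slice, List.filter_cons] at h0
      rw [show (scrabScore a == scrabScore a) = true by simp,
          show (scrabScore b == scrabScore a) = true by simp [hab]] at h0
      have hhead : a = b := (List.cons.injEq _ _ _ _ ▸ h0).1
      subst hhead
      have htails : ∀ s : Int, slice s ys' = slice s zs' := by
        intro s
        by_cases hs : scrabScore a = s
        · have := hf s
          simp only [slice, List.filter_cons, show (scrabScore a == s) = true by simp [hs]] at this
          exact List.cons.injEq _ _ _ _ ▸ this |>.2
        · have := hf s
          simpa only [slice, List.filter_cons,
            show (scrabScore a == s) = false by simp [hs]] using this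
      have := ih zs' htails (List.pairwise_cons.mp hys).2 (List.pairwise_cons.mp hzs).2
      rw [this]

-- ===== B-side characterisation =====

theorem build_getD (s : Int) : ∀ (xs : List String) (d : PySem.Dict Int (List String)),
    (xs.foldl (fun d w =>
      let t := scrabScore w
      d.insert t (d.getD t [] ++ [w])) d).getD s [] = d.getD s [] ++ slice s xs := by
  intro xs
  induction xs with
  | nil => intro d; simp [slice]
  | cons w xs' ih =>
    intro d
    simp only [List.foldl_cons]
    rw [ih]
    by_cases hw : scrabScore w = s
    · rw [PySem.Dict.getD_insert]
      simp [slice, hw]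
    · rw [PySem.Dict.getD_insert]
      simp only [if_neg (by omega : ¬ s = scrabScore w)]
      simp [slice, show (scrabScore w == s) = false by simp [hw]]

theorem build_keys_mem (s : Int) : ∀ (xs : List String) (d : PySem.Dict Int (List String)),
    s ∈ (xs.foldl (fun d w =>
      let t := scrabScore w
      d.insert t (d.getD t [] ++ [w])) d).keys ↔ s ∈ d.keys ∨ ∃ w ∈ xs, scrabScore w = s := by
  intro xs
  induction xs with
  | nil => intro d; simp
  | cons w xs' ih =>
    intro d
    simp only [List.foldl_cons]
    rw [ih]
    rw [PySem.Dict.mem_keys_insert]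
    constructor
    · rintro ((h | h) | h)
      · exact Or.inr ⟨w, by simp, h.symm⟩
      · exact Or.inl h
      · rcases h with ⟨v, hv, hvs⟩; exact Or.inr ⟨v, by simp [hv], hvs⟩
    · rintro (h | ⟨v, hv, hvs⟩)
      · exact Or.inl (Or.inr h)
      · rcases List.mem_cons.mp hv with hv | hv
        · subst hv; exact Or.inl (Or.inl hvs.symm)
        · exact Or.inr ⟨v, hv, hvs⟩

theorem build_keys_nodup : ∀ (xs : List String) (d : PySem.Dict Int (List String)),
    d.keys.Nodup → (xs.foldl (fun d w =>
      let t := scrabScore w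
      d.insert t (d.getD t [] ++ [w])) d).keys.Nodup := by
  intro xs
  induction xs with
  | nil => intro d h; simpa
  | cons w xs' ih =>
    intro d h
    simp only [List.foldl_cons]
    exact ih _ (PySem.Dict.nodup_keys_insert _ _ _ h)

-- flatMap over nodup scores: only the matching bucket survives a slice
theorem slice_flatMap (s : Int) (f : Int → List String)
    (hf : ∀ t w, w ∈ f t → scrabScore w = t) :
    ∀ L : List Int, L.Nodup →
      slice s (L.flatMap f) = if s ∈ L then f s else [] := by
  intro L
  induction L with
  | nil => intro _; simp [slice]
  | cons t L' ih =>
    intro hnd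
    simp only [List.flatMap_cons]
    have : slice s (f t ++ L'.flatMap f) = slice s (f t) ++ slice s (L'.flatMap f) := by
      simp [slice]
    rw [this, ih (List.nodup_cons.mp hnd).2]
    by_cases hts : t = s
    · subst hts
      have h1 : slice t (f t) = f t := by
        apply List.filter_eq_self.mpr
        intro w hw; simp [hf t w hw]
      have h2 : t ∉ L' := (List.nodup_cons.mp hnd).1
      simp [h1, h2]
    · have h1 : slice s (f t) = [] := by
        apply List.filter_eq_nil_iff.mpr
        intro w hw
        simp [hf t w hw, hts]
      simp [h1, show ¬ s = t from fun hh => hts hh.symm]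

theorem pairwise_flatMap_desc (f : Int → List String)
    (hf : ∀ t w, w ∈ f t → scrabScore w = t) :
    ∀ L : List Int, L.Pairwise (fun a b => b ≤ a) →
      (L.flatMap f).Pairwise DescR := by
  intro L
  induction L with
  | nil => intro _; simp
  | cons t L' ih =>
    intro hp
    simp only [List.flatMap_cons]
    apply List.pairwise_append.mpr
    refine ⟨?_, ih (List.pairwise_cons.mp hp).2, ?_⟩
    · apply List.pairwise_iff_forall_sublist.mpr
      intro a b hab
      have ha := hf t a (hab.subset (by simp))
      have hb := hf t b (hab.subset (by simp))
      simp [DescR, ha, hb]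
    · intro a ha b hb
      have ha' := hf t a ha
      rcases List.mem_flatMap.mp hb with ⟨u, hu, hbu⟩
      have hb' := hf u b hbu
      have := (List.pairwise_cons.mp hp).1 u hu
      simp [DescR]; omega

theorem bucket_getD (xs : List String) (s : Int) :
    (buildBuckets xs).getD s [] = slice s xs := by
  unfold buildBuckets
  rw [build_getD]
  simp [PySem.Dict.getD_empty]

theorem buildBuckets_keys_mem (xs : List String) (s : Int) :
    s ∈ (buildBuckets xs).keys ↔ ∃ w ∈ xs, scrabScore w = s := by
  unfold buildBuckets
  rw [build_keys_mem]
  simp [show ((PySem.Dict.empty : PySem.Dict Int (List String)).keys) = [] from rfl]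

theorem buildBuckets_keys_nodup (xs : List String) : (buildBuckets xs).keys.Nodup := by
  unfold buildBuckets
  exact build_keys_nodup xs PySem.Dict.empty
    (by simp [show ((PySem.Dict.empty : PySem.Dict Int (List String)).keys) = [] from rfl])

-- B's result is the descending sweep of the score slices
theorem www_alt_eq (xs : List String) :
    www_alt xs = (PySem.List.sorted (buildBuckets xs).keys (fun k => k) true).flatMap
      (fun s => slice s xs) := by
  unfold www_alt
  rw [PySem.List.foldl_append_eq_flatMap]
  simp only [List.nil_append]
  apply List.flatMap_congr
  intro s _
  exact bucket_getD xs s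

theorem sortedKeys_nodup (xs : List String) :
    (PySem.List.sorted (buildBuckets xs).keys (fun k : Int => k) true).Nodup :=
  (PySem.List.sorted_perm _ _ _).nodup_iff.mpr (buildBuckets_keys_nodup xs)

theorem mem_sortedKeys (xs : List String) (s : Int) :
    s ∈ PySem.List.sorted (buildBuckets xs).keys (fun k : Int => k) true ↔
      ∃ w ∈ xs, scrabScore w = s := by
  rw [(PySem.List.sorted_perm _ _ _).mem_iff]
  exact buildBuckets_keys_mem xs s

-- B's result, characterised
theorem www_alt_slice (s : Int) (xs : List String) :
    slice s (www_alt xs) = slice s xs := by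
  rw [www_alt_eq]
  rw [slice_flatMap s (fun t => slice t xs)
      (fun t w hw => (mem_slice.mp hw).2) _ (sortedKeys_nodup xs)]
  by_cases hs : s ∈ PySem.List.sorted (buildBuckets xs).keys (fun k : Int => k) true
  · simp [hs]
  · rw [if_neg hs]
    have : ∀ w ∈ xs, scrabScore w ≠ s := by
      intro w hw hws
      exact hs ((mem_sortedKeys xs s).mpr ⟨w, hw, hws⟩)
    symm
    apply List.filter_eq_nil_iff.mpr
    intro w hw
    simp [this w hw]

theorem www_alt_pairwise (xs : List String) : (www_alt xs).Pairwise DescR := by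
  rw [www_alt_eq]
  apply pairwise_flatMap_desc
  · intro t w hw; exact (mem_slice.mp hw).2
  · exact PySem.List.sorted_pairwise_rev _ _

-- ===== VERDICT (by name: the statement is the Claim_ definition above) =====
theorem www_spec : Claim_equal_www := by
  intro xs _
  show loopA xs = www_alt xs
  apply slices_unique
  · intro s
    rw [loopA_filter, www_alt_slice]
  · exact loopA_pairwise xs
  · exact www_alt_pairwise xs
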